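-- pv_equiv track=rewrite | github.com/Lucassantos000/PythonPdf-to-image | metadate_pdf.py | tratadata
-- ===== SOURCE A (Python) =====
-- def tratadata(data):
--     carac = 0
--     ano = []
--     mes = []
--     dia = []
--
-- #inicio do for
--     for i in data:
--
--         if carac >=2 and carac <=5:
--             ano.append(i)
--
--
--         elif carac >5 and carac <=7:
--             mes.append(i)
--         elif carac >7 and carac<=9:
--             dia.append(i)
--
--         carac = carac + 1
--
-- #fim for
--
--     dia = ','.join(map(str,dia))
--     mes = ','.join(map(str,mes))
--     ano = ','.join(map(str,ano))
--     dia = dia.replace(',', '')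
--     mes = mes.replace(',', '')
--     ano = ano.replace(',', '')
--
--     data = f'{dia}/{mes}/{ano}'
--
--     return data
-- ===== SOURCE B (Python) =====
-- def tratadata(data):
--     ano = data[2:6].replace(',', '')
--     mes = data[6:8].replace(',', '')
--     dia = data[8:10].replace(',', '')
--     return f'{dia}/{mes}/{ano}'
-- ===== Notes on version B (the rewrite author's own statement) =====
-- stated objective: simpler
-- what changed: Replaces the character-by-character counter loop building three lists plus join/replace with direct string slicing of the three fixed fields (comma-stripping kept per field).
import Mathlib
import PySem

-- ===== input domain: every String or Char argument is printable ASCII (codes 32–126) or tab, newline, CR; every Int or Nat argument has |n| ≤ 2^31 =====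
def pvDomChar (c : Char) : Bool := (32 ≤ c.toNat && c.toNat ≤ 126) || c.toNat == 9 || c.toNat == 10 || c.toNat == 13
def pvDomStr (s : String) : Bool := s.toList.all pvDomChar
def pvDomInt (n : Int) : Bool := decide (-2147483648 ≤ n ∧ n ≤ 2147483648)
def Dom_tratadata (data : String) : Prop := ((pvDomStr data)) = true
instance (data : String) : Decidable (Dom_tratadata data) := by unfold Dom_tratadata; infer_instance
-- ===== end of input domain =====

-- B replaces A's per-character counter loop (three accumulators, then join/replace) by direct
-- slicing of the three fixed fields, keeping the per-field comma-stripping; objective: simpler.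

-- ===== PORT A =====
-- the 'for i in data' loop with counter carac and the three accumulator lists
def trataLoop : List Char → Int → List Char → List Char → List Char → List Char × List Char × List Char
  | [], _, ano, mes, dia => (ano, mes, dia)
  | i :: t, carac, ano, mes, dia =>
    if 2 ≤ carac ∧ carac ≤ 5 then trataLoop t (carac + 1) (ano ++ [i]) mes dia
    else if 5 < carac ∧ carac ≤ 7 then trataLoop t (carac + 1) ano (mes ++ [i]) dia
    else if 7 < carac ∧ carac ≤ 9 then trataLoop t (carac + 1) ano mes (dia ++ [i])
    else trataLoop t (carac + 1) ano mes dia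

def tratadata (data : String) : String :=
  let r := trataLoop data.toList 0 [] [] []
  -- ','.join(map(str, …)).replace(',', '') on each field (str of a 1-char string is itself)
  let dia := PySem.Chars.replace (PySem.Chars.join [','] (r.2.2.map (fun c => [c]))) [','] []
  let mes := PySem.Chars.replace (PySem.Chars.join [','] (r.2.1.map (fun c => [c]))) [','] []
  let ano := PySem.Chars.replace (PySem.Chars.join [','] (r.1.map (fun c => [c]))) [','] []
  String.ofList (dia ++ '/' :: mes ++ '/' :: ano)   -- f'{dia}/{mes}/{ano}'

-- ===== PORT B =====
def tratadata_alt (data : String) : String :=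
  let l := data.toList
  let ano := PySem.Chars.replace (PySem.Chars.slice l (some 2) (some 6)) [','] []
  let mes := PySem.Chars.replace (PySem.Chars.slice l (some 6) (some 8)) [','] []
  let dia := PySem.Chars.replace (PySem.Chars.slice l (some 8) (some 10)) [','] []
  String.ofList (dia ++ '/' :: mes ++ '/' :: ano)   -- f'{dia}/{mes}/{ano}'

-- ===== PRECONDITION & SPEC =====
def Spec_tratadata (data : String) (out : String) : Prop := out = tratadata_alt data
instance (data : String) (out : String) : Decidable (Spec_tratadata data out) := by unfold Spec_tratadata; infer_instance

-- ===== CLAIM (what is proved, stated in full; the proofs are below) =====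
def Claim_equal_tratadata : Prop := ∀ (data : String), Dom_tratadata data → Spec_tratadata data (tratadata data)

-- ===== LEMMAS AND PROOFS =====

-- the list of elements of l picked up while the counter runs through [lo, hi]
def pick (lo hi : Int) : List Char → Int → List Char
  | [], _ => []
  | x :: t, c => if lo ≤ c ∧ c ≤ hi then x :: pick lo hi t (c + 1) else pick lo hi t (c + 1)

lemma trataLoop_eq : ∀ (l : List Char) (c : Int) (a m d : List Char),
    trataLoop l c a m d = (a ++ pick 2 5 l c, m ++ pick 6 7 l c, d ++ pick 8 9 l c) := by
  intro l
  induction l with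
  | nil => intro c a m d; simp [trataLoop, pick]
  | cons x t ih =>
    intro c a m d
    simp only [trataLoop, pick]
    split_ifs with h1 h2 h3 <;> simp [ih, List.append_assoc] <;> omega

lemma pick_high (lo hi : Int) : ∀ (l : List Char) (c : Int), hi < c → pick lo hi l c = [] := by
  intro l
  induction l with
  | nil => intro c _; simp [pick]
  | cons x t ih =>
    intro c h
    have : ¬ (lo ≤ c ∧ c ≤ hi) := by omega
    simp [pick, this, ih (c + 1) (by omega)]

lemma pick_mid (lo hi : Int) : ∀ (l : List Char) (c : Int), lo ≤ c → c ≤ hi + 1 →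
    pick lo hi l c = l.take (hi + 1 - c).toNat := by
  intro l
  induction l with
  | nil => intro c _ _; simp [pick]
  | cons x t ih =>
    intro c h1 h2
    by_cases h : c ≤ hi
    · have : lo ≤ c ∧ c ≤ hi := ⟨h1, h⟩
      have hn : (hi + 1 - c).toNat = (hi + 1 - (c + 1)).toNat + 1 := by omega
      simp [pick, this, hn, ih (c + 1) (by omega) (by omega)]
    · have hc : c = hi + 1 := by omega
      have hn : (hi + 1 - c).toNat = 0 := by omega
      have : ¬ (lo ≤ c ∧ c ≤ hi) := by omega
      simp [pick, this, hn, pick_high lo hi t (c + 1) (by omega)]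

lemma pick_low (lo hi : Int) (hlh : lo ≤ hi) : ∀ (l : List Char) (c : Int), c ≤ lo →
    pick lo hi l c = (l.drop (lo - c).toNat).take (hi + 1 - lo).toNat := by
  intro l
  induction l with
  | nil => intro c _; simp [pick]
  | cons x t ih =>
    intro c h
    by_cases hc : c < lo
    · have hn : (lo - c).toNat = (lo - (c + 1)).toNat + 1 := by omega
      have : ¬ (lo ≤ c ∧ c ≤ hi) := by omega
      simp [pick, this, hn, ih (c + 1) (by omega)]
    · have hc' : c = lo := by omega
      rw [hc', pick_mid lo hi (x :: t) lo le_rfl (by omega)]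
      simp

lemma replace_comma (s : List Char) :
    PySem.Chars.replace s [','] [] = s.filter (fun c => c ≠ ',') := by
  have go_spec : ∀ (fuel : Nat) (l acc : List Char), l.length ≤ fuel →
      PySem.Chars.replace.go [','] [] fuel l acc = acc.reverse ++ l.filter (fun c => c ≠ ',') := by
    intro fuel
    induction fuel with
    | zero =>
      intro l acc h
      have : l = [] := by cases l <;> simp_all
      subst this; simp [PySem.Chars.replace.go]
    | succ n ih =>
      intro l acc h
      cases l with
      | nil => simp [PySem.Chars.replace.go]
      | cons x t =>
        by_cases hx : x = ','
        · subst hx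
          have hp : List.isPrefixOf [','] (',' :: t) = true := by simp [List.isPrefixOf]
          simp only [PySem.Chars.replace.go, hp, if_pos, List.length_cons,
            List.length_nil, List.drop_succ_cons, List.drop_zero, List.reverse_nil,
            List.nil_append]
          rw [ih t acc (by simpa using h)]
          simp
        · have hp : List.isPrefixOf [','] (x :: t) = false := by
            simp [List.isPrefixOf]; exact fun h' => hx h'.symm
          simp only [PySem.Chars.replace.go, hp]
          rw [if_neg (by simp), ih t (x :: acc) (by simpa using h)]
          simp [hx]
  rw [PySem.Chars.replace]
  simp only [List.isEmpty_cons, if_false, Bool.false_eq_true]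
  exact (go_spec s.length s [] le_rfl).trans (by simp)

lemma join_filter (cs : List Char) :
    (PySem.Chars.join [','] (cs.map (fun c => [c]))).filter (fun c => c ≠ ',') =
      cs.filter (fun c => c ≠ ',') := by
  induction cs with
  | nil => simp [PySem.Chars.join, List.intercalate]
  | cons x t ih =>
    cases t with
    | nil => simp [PySem.Chars.join, List.intercalate]
    | cons y u =>
      simp only [PySem.Chars.join, List.map_cons] at *
      rw [show List.intercalate [','] ([x] :: [y] :: (u.map (fun c => [c]))) =
            [x] ++ [','] ++ List.intercalate [','] ([y] :: (u.map (fun c => [c]))) from by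
          simp [List.intercalate, List.intersperse]]
      simp only [List.filter_append, ih]
      rcases eq_or_ne x ',' with h | h <;> simp [List.filter_cons, h]

lemma field_eq (cs : List Char) :
    PySem.Chars.replace (PySem.Chars.join [','] (cs.map (fun c => [c]))) [','] [] =
      PySem.Chars.replace cs [','] [] := by
  rw [replace_comma, replace_comma, join_filter]

lemma slice_nat (l : List Char) (a b : Nat) :
    PySem.Chars.slice l (some (a : Int)) (some (b : Int)) = (l.drop a).take (b - a) := by
  simp only [PySem.Chars.slice_eq_listSlice]
  rw [PySem.List.slice_toNat l (a := (a : Int)) (b := (b : Int)) (by positivity) (by positivity)]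
  simp

-- ===== VERDICT (by name: the statement is the Claim_ definition above) =====
theorem tratadata_spec : Claim_equal_tratadata := by
  intro data _
  unfold Spec_tratadata tratadata tratadata_alt
  rw [trataLoop_eq]
  simp only [List.nil_append, field_eq]
  rw [pick_low 2 5 (by norm_num) data.toList 0 (by norm_num),
      pick_low 6 7 (by norm_num) data.toList 0 (by norm_num),
      pick_low 8 9 (by norm_num) data.toList 0 (by norm_num)]
  have h26 := slice_nat data.toList 2 6
  have h68 := slice_nat data.toList 6 8
  have h810 := slice_nat data.toList 8 10
  norm_num at h26 h68 h810 ⊢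
  rw [h26, h68, h810]
  simp only [show ((2:Int).toNat) = 2 from rfl, show ((4:Int).toNat) = 4 from rfl,
    show ((6:Int).toNat) = 6 from rfl, show ((8:Int).toNat) = 8 from rfl]
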